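-- pv_equiv track=rewrite | github.com/sicsempatyrannis/Hackarank-Leetcode | Word Sentences.py | anagramSentence
-- ===== SOURCE A (Python) =====
-- def anagramSentence(wordset, sentence):
--     ret = []
--     for i, j in enumerate(sentence):
--
--         sent_list = j.split()
--         res = 1
--         for a, b in enumerate(sent_list):
--             count = 0
--             for m, n in enumerate(wordset):
--                 if sorted(n) == sorted(b) and n != b:
--                     count += 1
--
--             res *= count
--         ret.append(res)
--
--     return ret
-- ===== SOURCE B (Python) =====
-- def anagramSentence(wordset, sentence):
--     sig_count = {}
--     word_count = {}
--     for n in wordset: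
--         s = ''.join(sorted(n))
--         sig_count[s] = sig_count.get(s, 0) + 1
--         word_count[n] = word_count.get(n, 0) + 1
--     ret = []
--     for j in sentence:
--         res = 1
--         for b in j.split():
--             res *= sig_count.get(''.join(sorted(b)), 0) - word_count.get(b, 0)
--         ret.append(res)
--     return ret
-- ===== Notes on version B (the rewrite author's own statement) =====
-- stated objective: faster
-- what changed: B precomputes one pass over wordset building a sorted-signature counter and an exact-word counter, so each sentence word is answered by two dict lookups (signature count minus exact matches) instead of rescanning and re-sorting the whole wordset.
import Mathlib
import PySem

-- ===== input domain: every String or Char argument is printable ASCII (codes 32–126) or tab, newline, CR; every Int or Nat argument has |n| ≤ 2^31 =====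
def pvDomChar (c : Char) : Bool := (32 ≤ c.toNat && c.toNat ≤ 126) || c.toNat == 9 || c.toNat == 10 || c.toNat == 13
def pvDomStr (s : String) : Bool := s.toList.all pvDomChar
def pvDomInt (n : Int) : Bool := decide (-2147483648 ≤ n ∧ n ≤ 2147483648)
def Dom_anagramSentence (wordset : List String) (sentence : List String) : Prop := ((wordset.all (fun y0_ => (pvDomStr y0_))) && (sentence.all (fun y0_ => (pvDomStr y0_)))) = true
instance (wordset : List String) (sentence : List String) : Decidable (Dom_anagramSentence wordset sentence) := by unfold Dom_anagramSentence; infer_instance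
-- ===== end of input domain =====

-- ===== PORT A =====
-- Port of A: for each sentence string, for each of its words b, scan the whole
-- wordset counting anagrams of b distinct from b, and multiply the counts.
def anagramSentence (wordset : List String) (sentence : List String) : List Int :=
  sentence.foldl (fun ret j =>
    ret ++ [(PySem.Str.split₀ j).foldl (fun res b =>
      res * (wordset.foldl (fun count n =>
        if PySem.List.sorted n.toList (fun c => c) false
             = PySem.List.sorted b.toList (fun c => c) false ∧ n ≠ b
        then count + 1 else count) 0)) 1]) []

-- ===== PORT B =====
-- ''.join(sorted(w)) : the sorted-character signature of a word
def sigStr (w : String) : String :=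
  PySem.Str.join "" ((PySem.List.sorted w.toList (fun c => c) false).map (fun c => String.ofList [c]))

-- Port of B: one pass over wordset builds a signature counter and an exact-word
-- counter; each sentence word is then answered by two dictionary lookups.
def anagramSentence_alt (wordset : List String) (sentence : List String) : List Int :=
  let dicts := wordset.foldl
    (fun (p : PySem.Dict String Int × PySem.Dict String Int) n =>
      (p.1.insert (sigStr n) (p.1.getD (sigStr n) 0 + 1),
       p.2.insert n (p.2.getD n 0 + 1)))
    (PySem.Dict.empty, PySem.Dict.empty)
  sentence.foldl (fun ret j =>
    ret ++ [(PySem.Str.split₀ j).foldl (fun res b =>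
      res * (dicts.1.getD (sigStr b) 0 - dicts.2.getD b 0)) 1]) []

-- ===== PRECONDITION & SPEC =====
def Spec_anagramSentence (wordset : List String) (sentence : List String) (out : List Int) : Prop := out = anagramSentence_alt wordset sentence
instance (wordset : List String) (sentence : List String) (out : List Int) : Decidable (Spec_anagramSentence wordset sentence out) := by unfold Spec_anagramSentence; infer_instance

-- ===== CLAIM (what is proved, stated in full; the proofs are below) =====
def Claim_equal_anagramSentence : Prop := ∀ (wordset : List String) (sentence : List String), Dom_anagramSentence wordset sentence → Spec_anagramSentence wordset sentence (anagramSentence wordset sentence)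

-- ===== LEMMAS AND PROOFS =====

-- B's single pass with two dicts is the pair of the two one-dict passes
theorem dict_fold_split (ws : List String) (d1 d2 : PySem.Dict String Int) :
    ws.foldl (fun (p : PySem.Dict String Int × PySem.Dict String Int) n =>
        (p.1.insert (sigStr n) (p.1.getD (sigStr n) 0 + 1),
         p.2.insert n (p.2.getD n 0 + 1))) (d1, d2)
      = (ws.foldl (fun d n => d.insert (sigStr n) (d.getD (sigStr n) 0 + 1)) d1,
         ws.foldl (fun d n => d.insert n (d.getD n 0 + 1)) d2) := by
  induction ws generalizing d1 d2 with
  | nil => rfl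
  | cons n t ih => exact ih _ _

theorem toList_sigStr (w : String) :
    (sigStr w).toList = PySem.List.sorted w.toList (fun c => c) false := by
  simp only [sigStr, PySem.Str.toList_join, List.map_map]
  have : (String.toList ∘ fun c => String.ofList [c]) = fun c => [c] := by
    funext c; simp [String.toList_ofList]
  rw [this]
  simp [PySem.Chars.join_nil_singletons (PySem.List.sorted w.toList (fun c => c) false)]

theorem sigStr_eq_iff (n b : String) :
    sigStr n = sigStr b ↔
      PySem.List.sorted n.toList (fun c => c) false = PySem.List.sorted b.toList (fun c => c) false := by
  constructor
  · intro h
    have := congrArg String.toList h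
    simpa [toList_sigStr] using this
  · intro h
    unfold sigStr
    rw [h]

-- counting anagrams distinct from b = all signature matches minus exact matches
theorem countP_sub (b : String) (ws : List String) :
    List.countP (fun n => decide (sigStr n = sigStr b ∧ n ≠ b)) ws
      + List.count b ws = List.countP (fun n => decide (sigStr n = sigStr b)) ws := by
  induction ws with
  | nil => simp
  | cons n t ih =>
    rw [List.countP_cons, List.countP_cons, List.count_cons]
    by_cases hnb : n = b
    · subst hnb
      have h1 : decide (sigStr n = sigStr n ∧ n ≠ n) = false := by simp
      have h2 : (n == n) = true := by simp
      have h3 : decide (sigStr n = sigStr n) = true := by simp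
      rw [h1, h2, h3]; simp only [Bool.false_eq_true, if_false, if_true]; omega
    · by_cases hs : sigStr n = sigStr b
      · have h1 : decide (sigStr n = sigStr b ∧ n ≠ b) = true := by simp [hs, hnb]
        have h2 : (n == b) = false := by simp [hnb]
        have h3 : decide (sigStr n = sigStr b) = true := by simp [hs]
        rw [h1, h2, h3]; simp only [Bool.false_eq_true, if_false, if_true]; omega
      · have h1 : decide (sigStr n = sigStr b ∧ n ≠ b) = false := by simp [hs]
        have h2 : (n == b) = false := by simp [hnb]
        have h3 : decide (sigStr n = sigStr b) = false := by simp [hs]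
        rw [h1, h2, h3]; simp only [Bool.false_eq_true, if_false]; omega

-- the per-word count of A equals B's two-lookup value
theorem count_eq (wordset : List String) (b : String) :
    wordset.foldl (fun count n =>
        if PySem.List.sorted n.toList (fun c => c) false
             = PySem.List.sorted b.toList (fun c => c) false ∧ n ≠ b
        then count + 1 else count) (0 : Int)
      = (PySem.Dict.counter (wordset.map sigStr)).getD (sigStr b) 0
          - (PySem.Dict.counter wordset).getD b 0 := by
  have hA : wordset.foldl (fun count n =>
      if PySem.List.sorted n.toList (fun c => c) false
           = PySem.List.sorted b.toList (fun c => c) false ∧ n ≠ b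
      then count + 1 else count) (0 : Int)
      = (List.countP (fun n => decide (sigStr n = sigStr b ∧ n ≠ b)) wordset : Int) := by
    have hf : (fun (count : Int) n =>
        if PySem.List.sorted n.toList (fun c => c) false
             = PySem.List.sorted b.toList (fun c => c) false ∧ n ≠ b
        then count + 1 else count)
        = fun (count : Int) n =>
            if (fun n => decide (sigStr n = sigStr b ∧ n ≠ b)) n = true then count + 1 else count := by
      funext count n
      simp [sigStr_eq_iff]
    rw [hf, PySem.List.foldl_count_if]
    simp
  rw [hA, PySem.Dict.getD_counter, PySem.Dict.getD_counter]
  rw [List.count_eq_countP, List.countP_map]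
  have hc : ((fun x => x == sigStr b) ∘ sigStr) = fun n => decide (sigStr n = sigStr b) := by
    funext n; exact Bool.beq_eq_decide_eq _ _
  rw [hc]
  have := countP_sub b wordset
  omega

-- ===== VERDICT (by name: the statement is the Claim_ definition above) =====
theorem anagramSentence_spec : Claim_equal_anagramSentence := by
  intro wordset sentence _
  unfold Spec_anagramSentence anagramSentence anagramSentence_alt
  dsimp only
  rw [dict_fold_split]
  dsimp only
  rw [show wordset.foldl (fun d n => d.insert (sigStr n) (d.getD (sigStr n) 0 + 1)) PySem.Dict.empty
        = PySem.Dict.counter (wordset.map sigStr) by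
    rw [← PySem.Dict.foldl_insert_getD_add_one_eq_counter, List.foldl_map]]
  rw [PySem.Dict.foldl_insert_getD_add_one_eq_counter]
  simp only [count_eq]
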